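-- pv_equiv track=rewrite | github.com/ShubhamMandal07/SearchEngine | IR.py | queryPermuterm
-- ===== SOURCE A (Python) =====
-- def queryPermuterm(word):
--     permuterms = []
--     word = word + "$"  # Add a unique character to mark the end of the word
--
--     for i in range(len(word)):
--         permuterms.append(word[i:] + word[:i])
--         wildQ = permuterms[i]
--         if wildQ[-1] == "*":
--             return wildQ
-- ===== SOURCE B (Python) =====
-- def queryPermuterm(word):
--     try:
--         i = word.index("*")
--     except ValueError:
--         return None
--     w = word + "$"
--     return w[i + 1:] + w[:i + 1]
-- ===== Notes on version B (the rewrite author's own statement) =====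
-- stated objective: faster
-- what changed: B finds the index of '*' once with str.index and constructs the single matching rotation of word+'$' by two slices, instead of generating every rotation and checking each one's last character.
import Mathlib
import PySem

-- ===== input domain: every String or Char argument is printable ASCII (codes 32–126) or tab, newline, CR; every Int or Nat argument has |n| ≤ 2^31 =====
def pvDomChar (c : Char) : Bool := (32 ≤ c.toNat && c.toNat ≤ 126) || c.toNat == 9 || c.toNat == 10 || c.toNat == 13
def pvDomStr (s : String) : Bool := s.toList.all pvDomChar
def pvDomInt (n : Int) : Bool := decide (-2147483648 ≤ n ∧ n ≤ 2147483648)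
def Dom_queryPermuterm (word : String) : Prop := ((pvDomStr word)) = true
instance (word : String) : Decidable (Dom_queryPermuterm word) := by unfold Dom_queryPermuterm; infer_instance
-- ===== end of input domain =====

-- B replaces A's O(n^2) scan over all rotations by finding the '*' index once and
-- building the single matching rotation (objective: faster, asymptotic).

-- ===== PORT A =====
-- loop body of A: for each i in the index list, form rotation word[i:]+word[:i],
-- return it if its last character is '*' (wildQ[-1]; wildQ is never empty since w ≠ []).
def qpGoA (w : List Char) : List Nat → Option String
  | [] => none
  | i :: rest =>
    let wildQ := w.drop i ++ w.take i
    if wildQ.getLast? = some '*' then some (String.ofList wildQ) else qpGoA w rest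

def queryPermuterm (word : String) : Option String :=
  let w := word.toList ++ ['$']    -- word = word + "$"
  qpGoA w (List.range w.length)

-- ===== PORT B =====
def queryPermuterm_alt (word : String) : Option String :=
  match word.toList.idxOf? '*' with     -- word.index("*"), except ValueError → None
  | none => none
  | some i =>
    let w := word.toList ++ ['$']       -- w = word + "$"
    some (String.ofList (w.drop (i + 1) ++ w.take (i + 1)))   -- w[i+1:] + w[:i+1]

-- ===== PRECONDITION & SPEC =====
def Spec_queryPermuterm (word : String) (out : Option String) : Prop := out = queryPermuterm_alt word
instance (word : String) (out : Option String) : Decidable (Spec_queryPermuterm word out) := by unfold Spec_queryPermuterm; infer_instance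

-- ===== CLAIM (what is proved, stated in full; the proofs are below) =====
def Claim_equal_queryPermuterm : Prop := ∀ (word : String), Dom_queryPermuterm word → Spec_queryPermuterm word (queryPermuterm word)

-- ===== LEMMAS AND PROOFS =====

-- the last character of the i-th rotation (1 ≤ i ≤ w.length) is w[i-1]
theorem qp_rot_last (w : List Char) (i : Nat) (h1 : 1 ≤ i) (h2 : i ≤ w.length) :
    (w.drop i ++ w.take i).getLast? = w[i - 1]? := by
  rw [List.getLast?_eq_getElem?]
  have hlen : (w.drop i ++ w.take i).length = w.length := by
    simp [Nat.min_eq_left h2]; omega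
  rw [hlen]
  rw [List.getElem?_append_right (by simp; omega)]
  have : w.length - 1 - (w.drop i).length = i - 1 := by simp; omega
  rw [this, List.getElem?_take]
  simp
  omega

-- main loop characterisation
theorem qp_go_aux (n : Nat) : ∀ (cs : List Char) (j : Nat), cs.length = j + n →
    qpGoA (cs ++ ['$']) (List.range' (j + 1) n) =
      match (cs.drop j).idxOf? '*' with
      | none => none
      | some t => some (String.ofList ((cs ++ ['$']).drop (j + t + 1) ++ (cs ++ ['$']).take (j + t + 1))) := by
  induction n with
  | zero =>
    intro cs j h
    have hd : cs.drop j = [] := List.drop_eq_nil_of_le (by omega)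
    simp [qpGoA, hd, List.idxOf?]
  | succ n ih =>
    intro cs j h
    have hj : j < cs.length := by omega
    rw [List.range'_succ]
    show qpGoA (cs ++ ['$']) ((j + 1) :: List.range' (j + 2) n) = _
    have hlast : ((cs ++ ['$']).drop (j + 1) ++ (cs ++ ['$']).take (j + 1)).getLast? =
        (cs ++ ['$'])[j]? := by
      have := qp_rot_last (cs ++ ['$']) (j + 1) (by omega) (by simp; omega)
      simpa using this
    have hgj : (cs ++ ['$'])[j]? = some cs[j] := by
      rw [List.getElem?_append_left hj, List.getElem?_eq_getElem hj]
    have hdropj : cs.drop j = cs[j] :: cs.drop (j + 1) := (List.getElem_cons_drop hj).symm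
    by_cases hc : cs[j] = '*'
    · rw [qpGoA]
      simp only [hlast, hgj, hc]
      rw [hdropj, hc]
      simp [List.idxOf?_cons]
    · rw [qpGoA]
      simp only [hlast, hgj]
      rw [if_neg (by simp [hc])]
      have hrec := ih cs (j + 1) (by omega)
      rw [hrec, hdropj, List.idxOf?_cons]
      rw [if_neg (by simp [beq_iff_eq]; exact hc)]
      cases hfind : (cs.drop (j + 1)).idxOf? '*' with
      | none => simp
      | some t =>
        simp only [Option.map_some]
        have : j + 1 + t + 1 = j + (t + 1) + 1 := by omega
        rw [this]

theorem qp_main (cs : List Char) :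
    qpGoA (cs ++ ['$']) (List.range (cs ++ ['$']).length) =
      match cs.idxOf? '*' with
      | none => none
      | some i => some (String.ofList ((cs ++ ['$']).drop (i + 1) ++ (cs ++ ['$']).take (i + 1))) := by
  have hlen : (cs ++ ['$']).length = cs.length + 1 := by simp
  rw [hlen, List.range_eq_range', List.range'_succ]
  rw [qpGoA]
  have h0 : ((cs ++ ['$']).drop 0 ++ (cs ++ ['$']).take 0).getLast? = some '$' := by
    simp
  rw [if_neg (by rw [h0]; simp)]
  have := qp_go_aux cs.length cs 0 (by omega)
  simpa using this

-- ===== VERDICT (by name: the statement is the Claim_ definition above) =====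
theorem queryPermuterm_spec : Claim_equal_queryPermuterm := by
  intro word _
  unfold Spec_queryPermuterm queryPermuterm queryPermuterm_alt
  have := qp_main word.toList
  simp only [this]
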